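-- pv_equiv track=rewrite | github.com/aerimforest/Algorithm-Study | Baekjoon/donggeun/이차원 배열과 연산.py | r_cal
-- ===== SOURCE A (Python) =====
-- from collections import Counter
--
-- def zero_padding(arr: list[list]):
--     n = len(arr)
--     max_idx = max([len(arr[i]) for i in range(n)])
--     for i in range(n):
--         arr[i].extend([0]*(max_idx - len(arr[i])))
--     return arr
--
-- def r_cal(arr: list[list]) -> list[list]:
--     for i in range(len(arr)):
--         tmp = sorted([(num, cnt) for num, cnt in Counter(arr[i]).items()], key=lambda x:(x[1], x[0]))
--         sorted_tmp = []
--         for num, cnt in tmp: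
--             if num != 0:
--                 sorted_tmp.append(num)
--                 sorted_tmp.append(cnt)
--         arr[i] = sorted_tmp
--
--     return zero_padding(arr)
-- ===== SOURCE B (Python) =====
-- def r_cal(arr: list[list]) -> list[list]:
--     # Returns A's value; note: A mutates arr in place, B does not (return value only).
--     rows = []
--     for row in arr:
--         s = sorted(row)
--         pairs = []
--         i, n = 0, len(s)
--         while i < n:
--             j = i
--             while j < n and s[j] == s[i]:
--                 j += 1
--             pairs.append((s[i], j - i))
--             i = j
--         pairs.sort(key=lambda p: (p[1], p[0]))
--         rows.append([x for p in pairs if p[0] != 0 for x in p])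
--     m = max(len(r) for r in rows)
--     return [r + [0] * (m - len(r)) for r in rows]
-- ===== Notes on version B (the rewrite author's own statement) =====
-- stated objective: alternative
-- what changed: Per row, the Counter hash pass is replaced by one sort of the row followed by a run-length scan of consecutive equal values; the flatten loop becomes a comprehension and the padding builds new rows instead of extending in place.
-- outside the precondition, e.g. on r_cal([]): A raises ValueError, B raises ValueError
import Mathlib
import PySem

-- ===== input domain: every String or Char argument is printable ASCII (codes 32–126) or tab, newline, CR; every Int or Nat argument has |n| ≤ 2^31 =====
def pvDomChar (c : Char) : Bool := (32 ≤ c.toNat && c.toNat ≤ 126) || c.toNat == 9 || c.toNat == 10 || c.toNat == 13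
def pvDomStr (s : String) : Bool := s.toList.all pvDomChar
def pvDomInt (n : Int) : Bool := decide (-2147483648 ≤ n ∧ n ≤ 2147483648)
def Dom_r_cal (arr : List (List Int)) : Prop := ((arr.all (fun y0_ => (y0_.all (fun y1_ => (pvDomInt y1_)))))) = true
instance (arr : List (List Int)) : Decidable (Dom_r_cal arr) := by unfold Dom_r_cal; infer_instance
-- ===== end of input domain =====

-- B replaces the Counter with a single sort per row and a run-length scan over the
-- sorted row (alternative decomposition, similar cost). A mutates arr in place, B does
-- not: the equivalence proved here is about the return value only.

-- ===== PORT A =====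
-- per-row encoding of A: Counter items, sorted by (count, value), flattened by a loop skipping value 0
def encodeA (row : List Int) : List Int :=
  let tmp := PySem.List.sorted2 (PySem.Dict.counter row).items (fun p => p.2) (fun p => p.1) false
  tmp.foldl (fun acc p => if p.1 ≠ 0 then acc ++ [p.1, p.2] else acc) []

def r_cal (arr : List (List Int)) : List (List Int) :=
  let arr2 := arr.map encodeA
  -- zero_padding: max([...]) raises ValueError on empty arr (excluded by Pre_); none-branch unreachable under Pre_
  match PySem.List.max? (arr2.map (fun r => (r.length : Int))) (fun x => x) with
  | none => []
  | some m => arr2.map (fun r => r ++ List.replicate (m - (r.length : Int)).toNat 0)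

-- ===== PORT B =====
-- run-length scan over a sorted row: the inner while-loops of Source B as structural recursion
def runsAux (v : Int) (c : Int) : List Int → List (Int × Int)
  | [] => [(v, c)]
  | y :: t => if y = v then runsAux v (c + 1) t else (v, c) :: runsAux y 1 t

def runs : List Int → List (Int × Int)
  | [] => []
  | x :: t => runsAux x 1 t

def encodeB (row : List Int) : List Int :=
  let pairs := PySem.List.sorted2 (runs (PySem.List.sorted row (fun x => x) false))
      (fun p => p.2) (fun p => p.1) false
  (pairs.filter (fun p => p.1 ≠ 0)).flatMap (fun p => [p.1, p.2])

def r_cal_alt (arr : List (List Int)) : List (List Int) :=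
  let rows := arr.map encodeB
  match PySem.List.max? (rows.map (fun r => (r.length : Int))) (fun x => x) with
  | none => []
  | some m => rows.map (fun r => r ++ List.replicate (m - (r.length : Int)).toNat 0)

-- ===== PRECONDITION & SPEC =====
-- Pre_ excludes only the empty outer list, on which A (and B) raises ValueError via max([]).
def Pre_r_cal (arr : List (List Int)) : Prop := arr ≠ []
instance (arr : List (List Int)) : Decidable (Pre_r_cal arr) := by unfold Pre_r_cal; infer_instance
def pvWitness_r_cal : List (List Int) := [[1, 2, 1], [0, 3]]
def Spec_r_cal (arr : List (List Int)) (out : List (List Int)) : Prop := out = r_cal_alt arr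
instance (arr : List (List Int)) (out : List (List Int)) : Decidable (Spec_r_cal arr out) := by unfold Spec_r_cal; infer_instance

-- ===== CLAIM (what is proved, stated in full; the proofs are below) =====
def Claim_equal_r_cal : Prop := ∀ (arr : List (List Int)), Dom_r_cal arr → Pre_r_cal arr → Spec_r_cal arr (r_cal arr)

-- ===== LEMMAS AND PROOFS =====

-- sorted2 with Int keys is sorted with the lexicographic key
theorem sorted2_eq_sorted_lex {α : Type} (xs : List α) (k1 k2 : α → Int) :
    PySem.List.sorted2 xs k1 k2 false
      = PySem.List.sorted xs (fun a => toLex (k1 a, k2 a)) false := by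
  rw [PySem.List.sorted_eq_foldl_insertBy]
  show List.foldl _ [] xs = List.foldl _ [] xs
  congr 1
  funext acc x
  congr 1
  funext a b
  have hlex : (toLex (k1 a, k2 a) < toLex (k1 b, k2 b)) ↔
      (k1 a < k1 b ∨ k1 a = k1 b ∧ k2 a < k2 b) := Prod.Lex.lt_iff
  by_cases h1 : k1 a < k1 b <;> by_cases h2 : k1 b < k1 a <;> by_cases h3 : k2 a < k2 b <;>
    simp [hlex, h1, h2, h3] <;> omega

theorem runsAux_eq (t : List Int) : ∀ (v c : Int), List.Pairwise (· ≤ ·) (v :: t) →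
    runsAux v c t = (v, c + (t.count v : Int)) :: runs (t.filter (fun y => y ≠ v)) := by
  induction t with
  | nil => intro v c _; simp [runsAux, runs]
  | cons y t' ih =>
    intro v c h
    by_cases hy : y = v
    · subst hy
      have h' : List.Pairwise (· ≤ ·) (y :: t') := (List.pairwise_cons.mp h).2
      rw [show runsAux y c (y :: t') = runsAux y (c + 1) t' from by simp [runsAux]]
      rw [ih y (c + 1) h']
      have hc : ((y :: t').count y : Int) = (t'.count y : Int) + 1 := by
        rw [List.count_cons]; simp
      have hf : (y :: t').filter (fun z => z ≠ y) = t'.filter (fun z => z ≠ y) := by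
        simp [List.filter_cons]
      rw [hc, hf, show c + 1 + (t'.count y : Int) = c + ((t'.count y : Int) + 1) from by ring]
    · have hvy : v < y := by
        rcases List.pairwise_cons.mp h with ⟨hle, _⟩
        exact lt_of_le_of_ne (hle y (by simp)) (fun e => hy e.symm)
      have hnot : v ∉ y :: t' := by
        intro hm
        rcases List.pairwise_cons.mp h with ⟨_, h2⟩
        rcases List.mem_cons.mp hm with e | hm2
        · exact hy e.symm
        · have := (List.pairwise_cons.mp h2).1 v hm2
          omega
      have hcount : ((y :: t').count v : Int) = 0 := by
        rw [List.count_eq_zero.mpr hnot]; rfl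
      have hfilter : (y :: t').filter (fun z => z ≠ v) = y :: t' := by
        apply List.filter_eq_self.mpr
        intro a ha
        simp only [ne_eq, decide_eq_true_eq]
        intro e; subst e; exact hnot ha
      rw [show runsAux v c (y :: t') = (v, c) :: runsAux y 1 t' from by simp [runsAux, hy]]
      rw [hcount, hfilter]
      simp [runs]

theorem runs_spec (n : Nat) : ∀ (l : List Int), l.length ≤ n → List.Pairwise (· ≤ ·) l →
    ((runs l).map Prod.fst).Nodup ∧
    (∀ v c, (v, c) ∈ runs l ↔ v ∈ l ∧ c = (l.count v : Int)) := by
  induction n with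
  | zero =>
    intro l hl _
    have : l = [] := List.eq_nil_of_length_eq_zero (Nat.le_zero.mp hl)
    subst this; simp [runs]
  | succ n ih =>
    intro l hl hp
    cases l with
    | nil => simp [runs]
    | cons x t =>
      have hruns : runs (x :: t) = (x, 1 + (t.count x : Int)) :: runs (t.filter (fun y => y ≠ x)) := by
        simp only [runs]; exact runsAux_eq t x 1 hp
      have hlen : (t.filter (fun y => y ≠ x)).length ≤ n := by
        have h1 := List.length_filter_le (fun y => decide (y ≠ x)) t
        have h2 : t.length ≤ n := by simpa using hl
        exact le_trans h1 h2
      have hpt : List.Pairwise (· ≤ ·) (t.filter (fun y => y ≠ x)) :=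
        ((List.pairwise_cons.mp hp).2).filter _
      obtain ⟨hnd, hmem⟩ := ih (t.filter (fun y => y ≠ x)) hlen hpt
      have hxnot : x ∉ t.filter (fun y => y ≠ x) := by
        intro hm
        have := (List.mem_filter.mp hm).2
        simp at this
      have hcnt_head : ((x :: t).count x : Int) = 1 + (t.count x : Int) := by
        rw [List.count_cons]; simp; ring
      constructor
      · rw [hruns]
        simp only [List.map_cons, List.nodup_cons]
        refine ⟨?_, hnd⟩
        intro hm
        rcases List.mem_map.mp hm with ⟨⟨v, c⟩, hvc, he⟩
        have := ((hmem v c).mp hvc).1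
        simp only at he; subst he
        exact hxnot this
      · intro v c
        rw [hruns]
        simp only [List.mem_cons, Prod.mk.injEq]
        constructor
        · rintro (⟨hv, hc⟩ | hm)
          · subst hv; subst hc
            exact ⟨Or.inl rfl, hcnt_head.symm⟩
          · obtain ⟨hv, hc⟩ := (hmem v c).mp hm
            have hvt : v ∈ t := (List.mem_filter.mp hv).1
            have hvx : v ≠ x := by
              have := (List.mem_filter.mp hv).2; simpa using this
            refine ⟨Or.inr hvt, ?_⟩
            rw [hc]
            have hcf : (t.filter (fun y => y ≠ x)).count v = t.count v :=
              List.count_filter (by simpa using hvx)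
            rw [hcf, List.count_cons]
            simp [Ne.symm hvx]
        · rintro ⟨hv, hc⟩
          by_cases hvx : v = x
          · subst hvx
            exact Or.inl ⟨rfl, by rw [hc, hcnt_head]⟩
          · rcases hv with hv | hv
            · exact absurd hv hvx
            right
            apply (hmem v c).mpr
            have hcf : (t.filter (fun y => y ≠ x)).count v = t.count v :=
              List.count_filter (by simpa using hvx)
            refine ⟨List.mem_filter.mpr ⟨hv, by simpa using hvx⟩, ?_⟩
            rw [hc, hcf, List.count_cons]
            simp [Ne.symm hvx]

theorem pairs_perm (row : List Int) :
    (runs (PySem.List.sorted row (fun x => x) false)).Perm ((PySem.Dict.counter row).items) := by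
  rw [PySem.Dict.items_counter]
  set s := PySem.List.sorted row (fun x => x) false with hs
  have hps : List.Pairwise (· ≤ ·) s := PySem.List.sorted_pairwise row (fun x => x)
  obtain ⟨hnd, hmem⟩ := runs_spec s.length s le_rfl hps
  have hperm : s.Perm row := PySem.List.sorted_perm row (fun x => x) false
  have hnd2 : ((PySem.Set.ofList row).map (fun k => (k, (row.count k : Int)))).Nodup := by
    apply List.Nodup.map
    · intro a b h
      exact ((Prod.mk.injEq _ _ _ _).mp h).1
    · exact PySem.Set.nodup_ofList row
  apply (List.perm_ext_iff_of_nodup (List.Nodup.of_map Prod.fst hnd) hnd2).mpr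
  rintro ⟨v, c⟩
  rw [hmem v c]
  constructor
  · rintro ⟨hv, hc⟩
    apply List.mem_map.mpr
    refine ⟨v, (PySem.Set.mem_ofList row v).mpr (hperm.mem_iff.mp hv), ?_⟩
    rw [hc, hperm.count_eq]
  · intro hm
    rcases List.mem_map.mp hm with ⟨k, hk, he⟩
    rcases (Prod.mk.injEq _ _ _ _).mp he with ⟨h1, h2⟩
    refine ⟨hperm.mem_iff.mpr (by rw [← h1]; exact (PySem.Set.mem_ofList row k).mp hk), ?_⟩
    rw [← h2, ← h1, hperm.count_eq]

theorem foldl_if_append_pair (l : List (Int × Int)) (acc : List Int) :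
    l.foldl (fun acc p => if p.1 ≠ 0 then acc ++ [p.1, p.2] else acc) acc
      = acc ++ (l.filter (fun p => p.1 ≠ 0)).flatMap (fun p => [p.1, p.2]) := by
  induction l generalizing acc with
  | nil => simp
  | cons p t ih =>
    rw [List.foldl_cons]
    by_cases hp : p.1 = 0
    · rw [if_neg (by simp [hp]), List.filter_cons_of_neg (by simp [hp])]
      exact ih acc
    · rw [if_pos hp, List.filter_cons_of_pos (by simpa using hp)]
      rw [ih (acc ++ [p.1, p.2])]
      simp

theorem encode_eq : encodeA = encodeB := by
  funext row
  unfold encodeA encodeB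
  have hkey : Function.Injective (fun p : Int × Int => toLex (p.2, p.1)) := by
    rintro ⟨a, b⟩ ⟨c, d⟩ h
    have h2 := (Prod.mk.injEq _ _ _ _).mp (toLex.injective h)
    simp only [Prod.mk.injEq]
    exact ⟨h2.2, h2.1⟩
  have hsort :
      PySem.List.sorted2 (PySem.Dict.counter row).items (fun p => p.2) (fun p => p.1) false
        = PySem.List.sorted2 (runs (PySem.List.sorted row (fun x => x) false))
            (fun p => p.2) (fun p => p.1) false := by
    rw [sorted2_eq_sorted_lex, sorted2_eq_sorted_lex]
    exact PySem.List.sorted_eq_sorted_of_perm _ _ _ hkey (pairs_perm row).symm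
  rw [hsort, foldl_if_append_pair]
  simp

-- ===== VERDICT (by name: the statement is the Claim_ definition above) =====
theorem r_cal_spec : Claim_equal_r_cal := by
  intro arr _ _
  unfold Spec_r_cal r_cal r_cal_alt
  rw [encode_eq]
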